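-- pv_equiv track=rewrite | github.com/alejoriosm04/university-repository | second-semester/Data-structure-and-algorithms-I/labs/seguimiento-1/seguimiento-1.1/maneras.py | puntos
-- ===== SOURCE A (Python) =====
-- def puntos(counter, n, puntos_turno):
--     if n <= 0:
--         if n == 0:
--             return 1 + counter
--         else:
--             return counter
--     else:
--         return puntos(counter, n-puntos_turno[0], puntos_turno) + puntos(counter, n-puntos_turno[1], puntos_turno) + puntos(counter, n-puntos_turno[2], puntos_turno)
-- ===== SOURCE B (Python) =====
-- def puntos(counter, n, puntos_turno):
--     if n <= 0:
--         return counter + 1 if n == 0 else counter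
--     a, b, c = puntos_turno[0], puntos_turno[1], puntos_turno[2]
--     # bottom-up DP, each score computed once: t[m] == puntos(counter, m, puntos_turno) for 0 <= m <= n
--     t = [counter + 1]
--     for m in range(1, n + 1):
--         t.append(sum(t[m - s] if m - s >= 0 else counter for s in (a, b, c)))
--     return t[n]
-- ===== Notes on version B (the rewrite author's own statement) =====
-- stated objective: alternative
-- what changed: replaced the triple-branching recursion by a bottom-up dynamic-programming table indexed by the remaining score, so each value 0..n is computed once
import Mathlib
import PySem

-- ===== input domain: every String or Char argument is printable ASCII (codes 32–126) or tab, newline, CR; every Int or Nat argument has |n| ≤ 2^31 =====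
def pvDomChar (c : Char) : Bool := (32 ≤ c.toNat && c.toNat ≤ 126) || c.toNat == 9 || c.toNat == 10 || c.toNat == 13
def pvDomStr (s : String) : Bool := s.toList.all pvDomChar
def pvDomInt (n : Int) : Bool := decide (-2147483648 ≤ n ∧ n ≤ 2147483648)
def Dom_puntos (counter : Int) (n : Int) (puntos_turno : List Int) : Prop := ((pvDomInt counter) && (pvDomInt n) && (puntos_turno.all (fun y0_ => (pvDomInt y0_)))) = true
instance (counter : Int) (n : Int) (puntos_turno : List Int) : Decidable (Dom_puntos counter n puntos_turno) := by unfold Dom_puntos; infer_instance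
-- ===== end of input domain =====

-- B replaces A's triple-branching recursion by a bottom-up DP table over the scores 0..n, each computed once (objective: alternative).

-- ===== PORT A =====
-- A's recursion, with a fuel guard only to make it total in Lean; under Pre_ the fuel n.toNat+1 is never exhausted
-- (each recursive call decreases n by at least 1 since the three steps are positive).
def puntosFuel : Nat → Int → Int → List Int → Int
  | 0, _, _, _ => 0
  | f+1, counter, n, pt =>
    if n ≤ 0 then
      if n = 0 then 1 + counter else counter
    else
      puntosFuel f counter (n - (PySem.List.pyGet? pt 0).getD 0) pt +
      puntosFuel f counter (n - (PySem.List.pyGet? pt 1).getD 0) pt +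
      puntosFuel f counter (n - (PySem.List.pyGet? pt 2).getD 0) pt

def puntos (counter : Int) (n : Int) (puntos_turno : List Int) : Int :=
  puntosFuel (n.toNat + 1) counter n puntos_turno

-- ===== PORT B =====
-- the loop `for m in range(1, n+1): t.append(...)` of Source B, one iteration per remaining count.
-- t is kept in REVERSE order so that each append is a cons (O(1)); at iteration m we have len(t) = m,
-- and Python's t[m-s] (taken only under the guard m-s >= 0, so `.toNat` is exact) is trev[s-1].
def buildLoop (counter a b c : Int) : Nat → List Int → List Int
  | 0, trev => trev
  | rem+1, trev =>
    let contrib : Int → Int := fun s =>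
      if 0 ≤ (trev.length : Int) - s then trev.getD (s - 1).toNat 0 else counter
    buildLoop counter a b c rem ((contrib a + contrib b + contrib c) :: trev)

def puntos_alt (counter : Int) (n : Int) (puntos_turno : List Int) : Int :=
  if n ≤ 0 then
    if n = 0 then counter + 1 else counter
  else
    -- t[n] is the element appended last, i.e. the head of the reversed table
    (buildLoop counter ((PySem.List.pyGet? puntos_turno 0).getD 0)
                       ((PySem.List.pyGet? puntos_turno 1).getD 0)
                       ((PySem.List.pyGet? puntos_turno 2).getD 0) n.toNat [counter + 1]).getD 0 0

-- ===== PRECONDITION & SPEC =====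
-- For n ≤ 0 A returns without touching puntos_turno; for n > 0 it needs three step sizes, and they must be
-- positive or A's recursion never terminates (RecursionError); Pre_ excludes exactly those raising inputs.
def Pre_puntos (counter : Int) (n : Int) (puntos_turno : List Int) : Prop :=
  n ≤ 0 ∨ (3 ≤ puntos_turno.length ∧
    0 < (PySem.List.pyGet? puntos_turno 0).getD 0 ∧
    0 < (PySem.List.pyGet? puntos_turno 1).getD 0 ∧
    0 < (PySem.List.pyGet? puntos_turno 2).getD 0)
instance (counter : Int) (n : Int) (puntos_turno : List Int) : Decidable (Pre_puntos counter n puntos_turno) := by unfold Pre_puntos; infer_instance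
def pvWitness_puntos : Int × Int × List Int := (2, 5, [1, 2, 3])

def Spec_puntos (counter : Int) (n : Int) (puntos_turno : List Int) (out : Int) : Prop := out = puntos_alt counter n puntos_turno
instance (counter : Int) (n : Int) (puntos_turno : List Int) (out : Int) : Decidable (Spec_puntos counter n puntos_turno out) := by unfold Spec_puntos; infer_instance

-- ===== CLAIM (what is proved, stated in full; the proofs are below) =====
def Claim_equal_puntos : Prop := ∀ (counter : Int) (n : Int) (puntos_turno : List Int), Dom_puntos counter n puntos_turno → Pre_puntos counter n puntos_turno → Spec_puntos counter n puntos_turno (puntos counter n puntos_turno)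

-- ===== LEMMAS AND PROOFS =====

-- proof-side model of the DP table in forward order: buildT counter a b c m = t after iteration m of Source B
def buildT (counter a b c : Int) : Nat → List Int
  | 0 => [counter + 1]
  | m+1 =>
    let t := buildT counter a b c m
    let contrib : Int → Int := fun s =>
      if 0 ≤ ((m : Int) + 1) - s then t.getD (((m : Int) + 1) - s).toNat 0 else counter
    t ++ [contrib a + contrib b + contrib c]

theorem getD_reverse (l : List Int) (k : Nat) (h : k < l.length) :
    l.reverse.getD (l.length - 1 - k) 0 = l.getD k 0 := by
  rw [List.getD_eq_getElem l 0 h, List.getD_eq_getElem _ 0 (by simp; omega)]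
  rw [List.getElem_reverse]
  congr 1
  omega

theorem buildT_length (counter a b c : Int) (m : Nat) : (buildT counter a b c m).length = m + 1 := by
  induction m with
  | zero => simp [buildT]
  | succ m ih => simp [buildT, ih]

-- entries already built are unchanged by later iterations
theorem buildT_prefix (counter a b c : Int) (m k : Nat) (h : k ≤ m) :
    (buildT counter a b c m).getD k 0 = (buildT counter a b c k).getD k 0 := by
  induction m with
  | zero => interval_cases k; rfl
  | succ m ih =>
    rcases Nat.lt_or_ge k (m+1) with hk | hk
    · rw [show buildT counter a b c (m+1) = buildT counter a b c m ++ _ from rfl]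
      rw [List.getD_append _ _ _ _ (by rw [buildT_length]; omega)]
      exact ih (by omega)
    · have hk2 : k = m + 1 := by omega
      subst hk2
      rfl

theorem buildLoop_eq_buildT (counter a b c : Int) (ha : 0 < a) (hb : 0 < b) (hc : 0 < c) :
    ∀ (rem m : Nat),
      buildLoop counter a b c rem (buildT counter a b c m).reverse =
        (buildT counter a b c (m + rem)).reverse := by
  intro rem
  induction rem with
  | zero => intro m; rfl
  | succ rem ih =>
    intro m
    have hcontrib : ∀ s : Int, 0 < s →
        (if 0 ≤ ((buildT counter a b c m).reverse.length : Int) - s then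
          (buildT counter a b c m).reverse.getD (s - 1).toNat 0 else counter) =
        (if 0 ≤ ((m : Int) + 1) - s then
          (buildT counter a b c m).getD (((m : Int) + 1) - s).toNat 0 else counter) := by
      intro s hs
      rw [List.length_reverse, buildT_length]
      by_cases hg : 0 ≤ ((m : Int) + 1) - s
      · rw [if_pos (by push_cast; omega), if_pos hg]
        have hk : (((m : Int) + 1) - s).toNat < (buildT counter a b c m).length := by
          rw [buildT_length]; omega
        have hidx : (s - 1).toNat = (buildT counter a b c m).length - 1 - (((m : Int) + 1) - s).toNat := by
          rw [buildT_length]; omega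
        rw [hidx, getD_reverse _ _ hk]
      · rw [if_neg (by push_cast; omega), if_neg hg]
    have hstep : buildLoop counter a b c (rem + 1) (buildT counter a b c m).reverse =
        buildLoop counter a b c rem (buildT counter a b c (m + 1)).reverse := by
      simp only [buildLoop, buildT]
      rw [hcontrib a ha, hcontrib b hb, hcontrib c hc]
      rw [List.reverse_append]
      rfl
    rw [hstep, ih (m + 1), show m + 1 + rem = m + (rem + 1) by omega]


theorem puntosFuel_eq_buildT (counter : Int) (pt : List Int)
    (ha : 0 < (PySem.List.pyGet? pt 0).getD 0)
    (hb : 0 < (PySem.List.pyGet? pt 1).getD 0)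
    (hc : 0 < (PySem.List.pyGet? pt 2).getD 0) :
    ∀ (f m : Nat), m < f →
      puntosFuel f counter (m : Int) pt =
        (buildT counter ((PySem.List.pyGet? pt 0).getD 0) ((PySem.List.pyGet? pt 1).getD 0)
          ((PySem.List.pyGet? pt 2).getD 0) m).getD m 0 := by
  set a := (PySem.List.pyGet? pt 0).getD 0
  set b := (PySem.List.pyGet? pt 1).getD 0
  set c := (PySem.List.pyGet? pt 2).getD 0
  intro f
  induction f with
  | zero => intro m hm; omega
  | succ f ih =>
    intro m hm
    cases m with
    | zero => simp [puntosFuel, buildT]; omega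
    | succ k =>
      have hbranch : ∀ s : Int, 0 < s →
          puntosFuel f counter (((k : Int) + 1) - s) pt =
            (if 0 ≤ ((k : Int) + 1) - s then
              (buildT counter a b c k).getD (((k : Int) + 1) - s).toNat 0 else counter) := by
        intro s hs
        rcases Int.lt_trichotomy (((k : Int) + 1) - s) 0 with hd | hd | hd
        · rw [if_neg (by omega)]
          cases f with
          | zero => omega
          | succ f' => simp only [puntosFuel]; rw [if_pos (by omega), if_neg (by omega)]
        · rw [if_pos (by omega)]
          rw [show ((k : Int) + 1) - s = ((0:Nat) : Int) by omega]
          simp only [Int.toNat_natCast]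
          rw [buildT_prefix _ _ _ _ _ _ (Nat.zero_le k)]
          exact ih 0 (by omega)
        · have hm' : (((k : Int) + 1) - s).toNat ≤ k := by omega
          have hcast : ((k : Int) + 1) - s = (((((k : Int) + 1) - s).toNat : Nat) : Int) := by omega
          rw [if_pos (by omega), buildT_prefix _ _ _ _ _ _ hm', hcast]
          simp only [Int.toNat_natCast]
          exact ih _ (by omega)
      have hk1 : ¬ ((k : Int) + 1 ≤ 0) := by omega
      simp only [puntosFuel, buildT]
      rw [Nat.cast_succ, if_neg hk1]
      rw [List.getD_append_right (buildT counter a b c k) _ 0 (k+1) (by rw [buildT_length])]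
      rw [buildT_length]
      simp only [Nat.sub_self, List.getD_cons_zero]
      rw [hbranch a ha, hbranch b hb, hbranch c hc]

-- ===== VERDICT (by name: the statement is the Claim_ definition above) =====
theorem puntos_spec : Claim_equal_puntos := by
  intro counter n pt _ hpre
  unfold Spec_puntos puntos puntos_alt
  by_cases hn : n ≤ 0
  · have hnt : n.toNat = 0 := by omega
    rw [hnt]
    by_cases h0 : n = 0
    · subst h0; simp [puntosFuel]; omega
    · simp only [puntosFuel]
      rw [if_pos hn, if_pos hn, if_neg h0, if_neg h0]
  · have hn' : 0 < n := by omega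
    rcases hpre with h | ⟨hlen, ha, hb, hc⟩
    · omega
    · rw [if_neg hn]
      set a := (PySem.List.pyGet? pt 0).getD 0
      set b := (PySem.List.pyGet? pt 1).getD 0
      set c := (PySem.List.pyGet? pt 2).getD 0
      have h1 : ([counter + 1] : List Int) = (buildT counter a b c 0).reverse := rfl
      rw [h1, buildLoop_eq_buildT counter a b c ha hb hc n.toNat 0, Nat.zero_add]
      have h2 : (0 : Nat) = (buildT counter a b c n.toNat).length - 1 - n.toNat := by
        rw [buildT_length]; omega
      rw [h2, getD_reverse _ _ (by rw [buildT_length]; omega)]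
      have hcast : n = ((n.toNat : Nat) : Int) := by omega
      rw [hcast]
      exact puntosFuel_eq_buildT counter pt ha hb hc (n.toNat + 1) n.toNat (Nat.lt_succ_self _)
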